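-- pv_equiv track=rewrite | github.com/DataCloud-project/DIS-PIPE | api/backend_api/start_app.py | translate_format
-- ===== SOURCE A (Python) =====
-- def translate_format(input_format):
--     # Define a mapping of format characters to their corresponding regular expression patterns
--     format_mapping = {
--         '%Y': r'\d{4}',
--         '%m': r'\d{2}',
--         '%d': r'\d{2}',
--         '%T': r'T',
--         '%H': r'\d{2}',
--         '%M': r'\d{2}',
--         '%S': r'\d{2}',
--         '%f': r'\d{1,6}',
--         '%z': r'\+\d{2}:\d{2}',
--     }
--
--     # Replace each format character with its corresponding regular expression pattern
--     for format_char, pattern in format_mapping.items():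
--         input_format = input_format.replace(format_char, pattern)
--
--     # Add anchors to make sure the pattern matches the entire string
--     output_pattern = f'^{input_format}$'
--
--     return output_pattern
-- ===== SOURCE B (Python) =====
-- def translate_format(input_format):
--     # Single left-to-right scan replacing each %X token once, instead of nine
--     # full-string .replace passes (replacement texts contain no percent sign, so no cascading).
--     mapping = {
--         'Y': r'\d{4}',
--         'm': r'\d{2}',
--         'd': r'\d{2}',
--         'T': r'T',
--         'H': r'\d{2}',
--         'M': r'\d{2}',
--         'S': r'\d{2}',
--         'f': r'\d{1,6}',
--         'z': r'\+\d{2}:\d{2}',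
--     }
--     out = ['^']
--     i, n = 0, len(input_format)
--     while i < n:
--         c = input_format[i]
--         if c == '%' and i + 1 < n and input_format[i + 1] in mapping:
--             out.append(mapping[input_format[i + 1]])
--             i += 2
--         else:
--             out.append(c)
--             i += 1
--     out.append('$')
--     return ''.join(out)
-- ===== Notes on version B (the rewrite author's own statement) =====
-- stated objective: alternative
-- what changed: B replaces A's nine sequential full-string str.replace passes with a single left-to-right scan that looks the character following each percent sign up in the mapping and rewrites every token exactly once (the replacement texts contain no percent sign, so the passes cannot cascade and one pass is exact).
import Mathlib
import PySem

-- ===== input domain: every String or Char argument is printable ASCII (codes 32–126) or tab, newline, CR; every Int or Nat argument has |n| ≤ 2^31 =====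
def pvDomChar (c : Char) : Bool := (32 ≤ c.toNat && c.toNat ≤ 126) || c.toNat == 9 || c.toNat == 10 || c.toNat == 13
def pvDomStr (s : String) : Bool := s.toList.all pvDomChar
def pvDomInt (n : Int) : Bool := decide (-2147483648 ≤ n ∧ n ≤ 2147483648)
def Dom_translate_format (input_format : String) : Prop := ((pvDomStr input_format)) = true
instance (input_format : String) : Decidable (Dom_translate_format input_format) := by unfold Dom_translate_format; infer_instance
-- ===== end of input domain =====

-- B replaces A's nine sequential full-string .replace passes by a single
-- left-to-right scan that rewrites each %X token once (objective: alternative,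
-- one pass instead of nine).

-- ===== PORT A =====
-- the dict's items(), in insertion order
def pvPairsA : List (String × String) :=
  [("%Y", "\\d{4}"), ("%m", "\\d{2}"), ("%d", "\\d{2}"), ("%T", "T"),
   ("%H", "\\d{2}"), ("%M", "\\d{2}"), ("%S", "\\d{2}"), ("%f", "\\d{1,6}"),
   ("%z", "\\+\\d{2}:\\d{2}")]

def translate_format (input_format : String) : String :=
  -- for format_char, pattern in format_mapping.items(): input_format = input_format.replace(...)
  -- then f'^{input_format}$'
  String.ofList
    ('^' :: (pvPairsA.foldl (fun acc pr => PySem.Str.replace acc pr.1 pr.2) input_format).toList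
      ++ ['$'])

-- ===== PORT B =====
-- Source B's mapping dict, looked up by the single character after '%'
def pvMapB (c : Char) : Option (List Char) :=
  if c = 'Y' then some "\\d{4}".toList
  else if c = 'm' then some "\\d{2}".toList
  else if c = 'd' then some "\\d{2}".toList
  else if c = 'T' then some "T".toList
  else if c = 'H' then some "\\d{2}".toList
  else if c = 'M' then some "\\d{2}".toList
  else if c = 'S' then some "\\d{2}".toList
  else if c = 'f' then some "\\d{1,6}".toList
  else if c = 'z' then some "\\+\\d{2}:\\d{2}".toList
  else none

-- the while loop of Source B: consume two chars on a %X token, else one char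
def pvScanB : List Char → List Char
  | [] => []
  | c :: t =>
    if c = '%' then
      match t with
      | c2 :: t' =>
        match pvMapB c2 with
        | some r => r ++ pvScanB t'
        | none => c :: pvScanB (c2 :: t')
      | [] => [c]
    else c :: pvScanB t
termination_by l => l.length
decreasing_by all_goals (simp; try omega)

def translate_format_alt (input_format : String) : String :=
  String.ofList ('^' :: pvScanB input_format.toList ++ ['$'])

-- ===== PRECONDITION & SPEC =====
def Spec_translate_format (input_format : String) (out : String) : Prop := out = translate_format_alt input_format
instance (input_format : String) (out : String) : Decidable (Spec_translate_format input_format out) := by unfold Spec_translate_format; infer_instance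

-- ===== CLAIM (what is proved, stated in full; the proofs are below) =====
def Claim_equal_translate_format : Prop := ∀ (input_format : String), Dom_translate_format input_format → Spec_translate_format input_format (translate_format input_format)

-- ===== LEMMAS AND PROOFS =====

-- structural form of s.replace('%x', r) for a two-character pattern
def pvRep (x : Char) (r : List Char) : List Char → List Char
  | [] => []
  | c :: t =>
    match t with
    | c2 :: t' => if c = '%' ∧ c2 = x then r ++ pvRep x r t' else c :: pvRep x r (c2 :: t')
    | [] => [c]
termination_by l => l.length
decreasing_by all_goals (simp; try omega)

-- scanner parameterized by the token map (proof-side generalization of pvScanB)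
def pvScan (m : Char → Option (List Char)) : List Char → List Char
  | [] => []
  | c :: t =>
    if c = '%' then
      match t with
      | c2 :: t' =>
        match m c2 with
        | some r => r ++ pvScan m t'
        | none => c :: pvScan m (c2 :: t')
      | [] => [c]
    else c :: pvScan m t
termination_by l => l.length
decreasing_by all_goals (simp; try omega)

def pvExt (x : Char) (rep : List Char) (m : Char → Option (List Char)) :
    Char → Option (List Char) :=
  fun c => if c = x then some rep else m c

-- equation lemmas for the well-founded definitions
@[simp] lemma pvRep_nil (x : Char) (r : List Char) : pvRep x r [] = [] := by
  rw [pvRep]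

@[simp] lemma pvRep_single (x : Char) (r : List Char) (c : Char) : pvRep x r [c] = [c] := by
  rw [pvRep]

lemma pvRep_cons₂ (x : Char) (r : List Char) (c c2 : Char) (t : List Char) :
    pvRep x r (c :: c2 :: t) =
      if c = '%' ∧ c2 = x then r ++ pvRep x r t else c :: pvRep x r (c2 :: t) := by
  rw [pvRep]

@[simp] lemma pvScan_nil (m : Char → Option (List Char)) : pvScan m [] = [] := by
  rw [pvScan]

@[simp] lemma pvScan_single (m : Char → Option (List Char)) (c : Char) :
    pvScan m [c] = [c] := by
  rw [pvScan]; split <;> simp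

lemma pvScan_cons₂ (m : Char → Option (List Char)) (c c2 : Char) (t : List Char) :
    pvScan m (c :: c2 :: t) =
      if c = '%' then
        match m c2 with
        | some r => r ++ pvScan m t
        | none => c :: pvScan m (c2 :: t)
      else c :: pvScan m (c2 :: t) := by
  rw [pvScan]

@[simp] lemma pvScanB_nil : pvScanB [] = [] := by rw [pvScanB]

@[simp] lemma pvScanB_single (c : Char) : pvScanB [c] = [c] := by
  rw [pvScanB]; split <;> simp

lemma pvScanB_cons₂ (c c2 : Char) (t : List Char) :
    pvScanB (c :: c2 :: t) =
      if c = '%' then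
        match pvMapB c2 with
        | some r => r ++ pvScanB t
        | none => c :: pvScanB (c2 :: t)
      else c :: pvScanB (c2 :: t) := by
  rw [pvScanB]

lemma pvRep_cons_ne (x : Char) (r : List Char) (c : Char) (l : List Char)
    (hc : c ≠ '%') : pvRep x r (c :: l) = c :: pvRep x r l := by
  cases l with
  | nil => simp
  | cons d t => rw [pvRep_cons₂]; simp [hc]

lemma pvScan_cons_ne (m : Char → Option (List Char)) (c : Char) (l : List Char)
    (hc : c ≠ '%') : pvScan m (c :: l) = c :: pvScan m l := by
  cases l with
  | nil => simp
  | cons d t => rw [pvScan_cons₂]; simp [hc]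

lemma pvRep_go (x : Char) (r : List Char) :
    ∀ fuel l acc, l.length ≤ fuel →
      PySem.Chars.replace.go ['%', x] r fuel l acc = acc.reverse ++ pvRep x r l := by
  intro fuel
  induction fuel with
  | zero =>
    intro l acc h
    have : l = [] := List.eq_nil_of_length_eq_zero (Nat.le_zero.mp h)
    subst this
    simp [PySem.Chars.replace.go]
  | succ n ih =>
    intro l acc h
    match l with
    | [] => simp [PySem.Chars.replace.go]
    | [c] =>
      have hpre : (['%', x].isPrefixOf [c]) = false := by
        simp [List.isPrefixOf]
      simp only [PySem.Chars.replace.go, hpre, Bool.false_eq_true, if_false]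
      rw [ih [] (c :: acc) (by simp)]
      simp
    | c :: c2 :: t =>
      have hlen : (c2 :: t).length ≤ n := by simpa using h
      have hlen' : t.length ≤ n := by simp at h; omega
      by_cases hc : c = '%' ∧ c2 = x
      · have hpre : (['%', x].isPrefixOf (c :: c2 :: t)) = true := by
          simp [List.isPrefixOf, hc.1, hc.2]
        simp only [PySem.Chars.replace.go, hpre, if_true]
        rw [show List.drop (['%', x].length) (c :: c2 :: t) = t by simp]
        rw [ih t (r.reverse ++ acc) hlen']
        rw [pvRep_cons₂]
        simp [hc]
      · have hpre : (['%', x].isPrefixOf (c :: c2 :: t)) = false := by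
          rw [Bool.eq_false_iff]
          intro hp
          rw [List.isPrefixOf_iff_prefix] at hp
          obtain ⟨u, hu⟩ := hp
          simp at hu
          exact hc ⟨hu.1.symm, hu.2.1.symm⟩
        simp only [PySem.Chars.replace.go, hpre, Bool.false_eq_true, if_false]
        rw [ih (c2 :: t) (c :: acc) hlen]
        rw [pvRep_cons₂]
        simp [hc]

lemma pvRep_replace (x : Char) (r s : List Char) :
    PySem.Chars.replace s ['%', x] r = pvRep x r s := by
  unfold PySem.Chars.replace
  simp only [List.isEmpty_cons, Bool.false_eq_true, if_false]
  simpa using pvRep_go x r s.length s [] (le_refl _)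

lemma pvRep_append_no_pct (x : Char) (r : List Char) :
    ∀ v u, '%' ∉ v → pvRep x r (v ++ u) = v ++ pvRep x r u := by
  intro v
  induction v with
  | nil => simp
  | cons c v' ih =>
    intro u hv
    have hc : c ≠ '%' := fun h => hv (by simp [h])
    have hv' : '%' ∉ v' := fun h => hv (by simp [h])
    rw [List.cons_append, pvRep_cons_ne x r c _ hc, ih u hv']
    simp

lemma pvScan_ne_nil (m : Char → Option (List Char))
    (hne : ∀ c r', m c = some r' → r' ≠ [])
    (d : Char) (u : List Char) : pvScan m (d :: u) ≠ [] := by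
  by_cases hd : d = '%'
  · subst hd
    cases u with
    | nil => simp
    | cons c2 t' =>
      rw [pvScan_cons₂]
      cases hm : m c2 with
      | some r' =>
        have := hne c2 r' hm
        simp [this]
      | none => simp
  · rw [pvScan_cons_ne m d u hd]; simp

lemma pvScan_head (m : Char → Option (List Char))
    (hne : ∀ c r', m c = some r' → r' ≠ [])
    (d : Char) (u : List Char) (e : Char)
    (h : (pvScan m (d :: u)).head? = some e) :
    e = d ∨ ∃ c r', m c = some r' ∧ r'.head? = some e := by
  by_cases hd : d = '%'
  · subst hd
    cases u with
    | nil => simp at h; exact Or.inl h.symm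
    | cons c2 t' =>
      rw [pvScan_cons₂] at h
      cases hm : m c2 with
      | some r' =>
        right
        refine ⟨c2, r', hm, ?_⟩
        have hr : r' ≠ [] := hne c2 r' hm
        rw [hm] at h
        simp only [if_true] at h
        rwa [List.head?_append_of_ne_nil _ hr] at h
      | none =>
        rw [hm] at h
        simp at h
        exact Or.inl h.symm
  · rw [pvScan_cons_ne m d u hd] at h
    simp at h
    exact Or.inl h.symm

lemma pvStep (x : Char) (rep : List Char) (m : Char → Option (List Char))
    (hx : x ≠ '%') (hmx : m x = none)
    (hv : ∀ c r', m c = some r' → r' ≠ [] ∧ '%' ∉ r' ∧ r'.head? ≠ some x) :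
    ∀ l, pvRep x rep (pvScan m l) = pvScan (pvExt x rep m) l := by
  have hne : ∀ c r', m c = some r' → r' ≠ [] := fun c r' h => (hv c r' h).1
  suffices H : ∀ n l, l.length ≤ n → pvRep x rep (pvScan m l) = pvScan (pvExt x rep m) l by
    intro l; exact H l.length l (le_refl _)
  intro n
  induction n with
  | zero =>
    intro l h
    have : l = [] := List.eq_nil_of_length_eq_zero (Nat.le_zero.mp h)
    subst this; simp
  | succ n ih =>
    intro l h
    match l with
    | [] => simp
    | c :: t =>
      by_cases hc : c = '%'
      · subst hc
        match t with
        | [] => simp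
        | c2 :: t' =>
          have hlt' : t'.length ≤ n := by simp at h; omega
          have hlt : (c2 :: t').length ≤ n := by simpa using h
          cases hm : m c2 with
          | some r' =>
            obtain ⟨hr1, hr2, hr3⟩ := hv c2 r' hm
            have hc2x : c2 ≠ x := fun hcx => by rw [hcx, hmx] at hm; simp at hm
            rw [pvScan_cons₂, if_pos rfl, hm]
            rw [pvRep_append_no_pct x rep r' _ hr2, ih t' hlt']
            rw [pvScan_cons₂, if_pos rfl]
            have : pvExt x rep m c2 = some r' := by simp [pvExt, hc2x, hm]
            rw [this]
          | none =>
            by_cases hcx : c2 = x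
            · rw [pvScan_cons₂, if_pos rfl, hm]
              rw [show pvScan m (c2 :: t') = c2 :: pvScan m t' from
                    pvScan_cons_ne m c2 t' (hcx ▸ hx)]
              rw [pvRep_cons₂, if_pos ⟨rfl, hcx⟩, ih t' hlt']
              rw [pvScan_cons₂, if_pos rfl]
              have : pvExt x rep m c2 = some rep := by simp [pvExt, hcx]
              rw [this]
            · rw [pvScan_cons₂, if_pos rfl, hm]
              obtain ⟨e, w, hw⟩ : ∃ e w, pvScan m (c2 :: t') = e :: w := by
                cases hsc : pvScan m (c2 :: t') with
                | nil => exact absurd hsc (pvScan_ne_nil m hne c2 t')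
                | cons e w => exact ⟨e, w, rfl⟩
              have hex : e ≠ x := by
                have := pvScan_head m hne c2 t' e (by rw [hw]; rfl)
                rcases this with h1 | ⟨c', r', hm', hh⟩
                · rw [h1]; exact hcx
                · intro hEx; rw [hEx] at hh; exact (hv c' r' hm').2.2 hh
              rw [hw, pvRep_cons₂, if_neg (by simp [hex]), ← hw,
                  ih (c2 :: t') hlt]
              rw [pvScan_cons₂, if_pos rfl]
              have : pvExt x rep m c2 = none := by simp [pvExt, hcx, hm]
              rw [this]
      · rw [pvScan_cons_ne m c t hc, pvRep_cons_ne x rep c _ hc,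
            ih t (by simp at h; omega), pvScan_cons_ne _ c t hc]

-- the empty map: the scanner is the identity
lemma pvScan_none : ∀ l, pvScan (fun _ => none) l = l := by
  intro l
  induction l with
  | nil => simp
  | cons c t ih =>
    by_cases hc : c = '%'
    · subst hc
      cases t with
      | nil => simp
      | cons c2 t' => rw [pvScan_cons₂, if_pos rfl]; rw [ih]
    · rw [pvScan_cons_ne _ c t hc, ih]

def pvM0 : Char → Option (List Char) := fun _ => none
def pvM1 : Char → Option (List Char) := pvExt 'Y' "\\d{4}".toList pvM0
def pvM2 : Char → Option (List Char) := pvExt 'm' "\\d{2}".toList pvM1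
def pvM3 : Char → Option (List Char) := pvExt 'd' "\\d{2}".toList pvM2
def pvM4 : Char → Option (List Char) := pvExt 'T' "T".toList pvM3
def pvM5 : Char → Option (List Char) := pvExt 'H' "\\d{2}".toList pvM4
def pvM6 : Char → Option (List Char) := pvExt 'M' "\\d{2}".toList pvM5
def pvM7 : Char → Option (List Char) := pvExt 'S' "\\d{2}".toList pvM6
def pvM8 : Char → Option (List Char) := pvExt 'f' "\\d{1,6}".toList pvM7
def pvM9 : Char → Option (List Char) := pvExt 'z' "\\+\\d{2}:\\d{2}".toList pvM8

lemma pvScan_congr (m m' : Char → Option (List Char)) (hm : ∀ c, m c = m' c) :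
    ∀ l, pvScan m l = pvScan m' l := by
  suffices H : ∀ n l, l.length ≤ n → pvScan m l = pvScan m' l by
    intro l; exact H l.length l (le_refl _)
  intro n
  induction n with
  | zero =>
    intro l h
    have : l = [] := List.eq_nil_of_length_eq_zero (Nat.le_zero.mp h)
    subst this; simp
  | succ n ih =>
    intro l h
    match l with
    | [] => simp
    | [c] => simp
    | c :: c2 :: t =>
      have hlt' : t.length ≤ n := by simp at h; omega
      have hlt : (c2 :: t).length ≤ n := by simpa using h
      rw [pvScan_cons₂, pvScan_cons₂, ← hm c2]
      by_cases hc : c = '%'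
      · cases hv : m c2 with
        | some r => simp [hc, ih t hlt']
        | none => simp [hc, ih (c2 :: t) hlt]
      · simp [hc, ih (c2 :: t) hlt]

lemma pvScanB_eq : ∀ l, pvScan pvMapB l = pvScanB l := by
  suffices H : ∀ n l, l.length ≤ n → pvScan pvMapB l = pvScanB l by
    intro l; exact H l.length l (le_refl _)
  intro n
  induction n with
  | zero =>
    intro l h
    have : l = [] := List.eq_nil_of_length_eq_zero (Nat.le_zero.mp h)
    subst this; simp
  | succ n ih =>
    intro l h
    match l with
    | [] => simp
    | [c] => simp
    | c :: c2 :: t =>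
      have hlt' : t.length ≤ n := by simp at h; omega
      have hlt : (c2 :: t).length ≤ n := by simpa using h
      rw [pvScan_cons₂, pvScanB_cons₂]
      by_cases hc : c = '%'
      · cases hv : pvMapB c2 with
        | some r => simp [hc, ih t hlt']
        | none => simp [hc, ih (c2 :: t) hlt]
      · simp [hc, ih (c2 :: t) hlt]

lemma pvM9_eq_pvMapB (c : Char) : pvM9 c = pvMapB c := by
  unfold pvM9 pvM8 pvM7 pvM6 pvM5 pvM4 pvM3 pvM2 pvM1 pvM0 pvExt pvMapB
  split_ifs <;> simp_all

lemma pvChainA (s : String) :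
    (pvPairsA.foldl (fun acc pr => PySem.Str.replace acc pr.1 pr.2) s).toList
      = pvScan pvM9 s.toList := by
  have hY : ∀ l, pvRep 'Y' "\\d{4}".toList (pvScan pvM0 l) = pvScan pvM1 l := pvStep 'Y' "\\d{4}".toList pvM0 (by decide) rfl
    (by intro c r' h; exact absurd h (by simp [pvM0]))  -- pvM0 has no entries
  have hm : ∀ l, pvRep 'm' "\\d{2}".toList (pvScan pvM1 l) = pvScan pvM2 l := pvStep 'm' "\\d{2}".toList pvM1 (by decide) (by decide)
    (by intro c r' h; unfold pvM1 pvExt pvM0 at h; split_ifs at h; injection h with h; subst h; decide)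
  have hd : ∀ l, pvRep 'd' "\\d{2}".toList (pvScan pvM2 l) = pvScan pvM3 l := pvStep 'd' "\\d{2}".toList pvM2 (by decide) (by decide)
    (by intro c r' h; unfold pvM2 pvM1 pvExt pvM0 at h; split_ifs at h <;> (injection h with h; subst h; decide))
  have hT : ∀ l, pvRep 'T' "T".toList (pvScan pvM3 l) = pvScan pvM4 l := pvStep 'T' "T".toList pvM3 (by decide) (by decide)
    (by intro c r' h; unfold pvM3 pvM2 pvM1 pvExt pvM0 at h; split_ifs at h <;> (injection h with h; subst h; decide))
  have hH : ∀ l, pvRep 'H' "\\d{2}".toList (pvScan pvM4 l) = pvScan pvM5 l := pvStep 'H' "\\d{2}".toList pvM4 (by decide) (by decide)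
    (by intro c r' h; unfold pvM4 pvM3 pvM2 pvM1 pvExt pvM0 at h; split_ifs at h <;> (injection h with h; subst h; decide))
  have hM : ∀ l, pvRep 'M' "\\d{2}".toList (pvScan pvM5 l) = pvScan pvM6 l := pvStep 'M' "\\d{2}".toList pvM5 (by decide) (by decide)
    (by intro c r' h; unfold pvM5 pvM4 pvM3 pvM2 pvM1 pvExt pvM0 at h; split_ifs at h <;> (injection h with h; subst h; decide))
  have hS : ∀ l, pvRep 'S' "\\d{2}".toList (pvScan pvM6 l) = pvScan pvM7 l := pvStep 'S' "\\d{2}".toList pvM6 (by decide) (by decide)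
    (by intro c r' h; unfold pvM6 pvM5 pvM4 pvM3 pvM2 pvM1 pvExt pvM0 at h; split_ifs at h <;> (injection h with h; subst h; decide))
  have hf : ∀ l, pvRep 'f' "\\d{1,6}".toList (pvScan pvM7 l) = pvScan pvM8 l := pvStep 'f' "\\d{1,6}".toList pvM7 (by decide) (by decide)
    (by intro c r' h; unfold pvM7 pvM6 pvM5 pvM4 pvM3 pvM2 pvM1 pvExt pvM0 at h; split_ifs at h <;> (injection h with h; subst h; decide))
  have hz : ∀ l, pvRep 'z' "\\+\\d{2}:\\d{2}".toList (pvScan pvM8 l) = pvScan pvM9 l := pvStep 'z' "\\+\\d{2}:\\d{2}".toList pvM8 (by decide) (by decide)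
    (by intro c r' h; unfold pvM8 pvM7 pvM6 pvM5 pvM4 pvM3 pvM2 pvM1 pvExt pvM0 at h; split_ifs at h <;> (injection h with h; subst h; decide))
  simp only [pvPairsA, List.foldl_cons, List.foldl_nil, PySem.Str.toList_replace]
  rw [show ("%Y" : String).toList = ['%', 'Y'] from rfl, pvRep_replace]
  rw [show ("%m" : String).toList = ['%', 'm'] from rfl, pvRep_replace]
  rw [show ("%d" : String).toList = ['%', 'd'] from rfl, pvRep_replace]
  rw [show ("%T" : String).toList = ['%', 'T'] from rfl, pvRep_replace]
  rw [show ("%H" : String).toList = ['%', 'H'] from rfl, pvRep_replace]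
  rw [show ("%M" : String).toList = ['%', 'M'] from rfl, pvRep_replace]
  rw [show ("%S" : String).toList = ['%', 'S'] from rfl, pvRep_replace]
  rw [show ("%f" : String).toList = ['%', 'f'] from rfl, pvRep_replace]
  rw [show ("%z" : String).toList = ['%', 'z'] from rfl, pvRep_replace]
  conv_lhs => rw [show s.toList = pvScan pvM0 s.toList from (pvScan_none s.toList).symm]
  rw [hY, hm, hd, hT, hH, hM, hS, hf, hz]

-- ===== VERDICT (by name: the statement is the Claim_ definition above) =====
theorem translate_format_spec : Claim_equal_translate_format := by
  intro s _
  unfold Spec_translate_format translate_format translate_format_alt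
  rw [pvChainA s, pvScan_congr pvM9 pvMapB pvM9_eq_pvMapB, pvScanB_eq]
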